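-- pv_equiv track=rewrite | github.com/rubix5d/SetBits | ass2.py | powerof8
-- ===== SOURCE A (Python) =====
-- def powerof8(number):
--     count = 0
--     if (number & (~(number & (~number & (number - 1))))):
--       while(number > 1):
--         number >>= 1
--         count += 1
--
--       if count % 2 == 0:
--          return True
--       else:
--          return False
-- ===== SOURCE B (Python) =====
-- def powerof8(number):
--     if number == 0:
--         return None
--     if number <= 1:
--         return True
--     return (number.bit_length() - 1) % 2 == 0
-- ===== Notes on version B (the rewrite author's own statement) =====
-- stated objective: idiomatic
-- what changed: The opaque bitwise guard (which equals the number itself) is replaced by a plain zero test, and the right-shift counting loop is replaced by the closed-form bit_length().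
import Mathlib
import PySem

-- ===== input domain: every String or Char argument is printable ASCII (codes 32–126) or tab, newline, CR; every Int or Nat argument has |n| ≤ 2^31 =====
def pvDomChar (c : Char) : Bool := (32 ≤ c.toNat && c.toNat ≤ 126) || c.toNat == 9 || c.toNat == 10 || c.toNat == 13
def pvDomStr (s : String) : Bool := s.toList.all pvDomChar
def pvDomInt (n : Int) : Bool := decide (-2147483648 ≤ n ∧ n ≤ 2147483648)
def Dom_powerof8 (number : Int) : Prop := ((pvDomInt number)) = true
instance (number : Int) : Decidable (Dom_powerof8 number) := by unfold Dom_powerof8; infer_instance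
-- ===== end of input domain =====

-- B replaces A's opaque bitwise guard (equal to the number itself) by a plain zero test and
-- A's shift-counting loop by the closed-form bit_length(); objective: idiomatic.

-- ===== PORT A =====
-- the 'while number > 1: number >>= 1; count += 1' loop, literally
def powerof8Loop (number : Int) (count : Int) : Int :=
  if 1 < number then powerof8Loop (number >>> (1 : Nat)) (count + 1) else count
termination_by number.toNat
decreasing_by
  rw [Int.shiftRight_eq_div_pow]
  simp only [pow_one]
  omega

def powerof8 (number : Int) : Option Bool :=
  -- Python truthiness of the int guard: nonzero
  if PySem.Int.band number (Int.not (PySem.Int.band number (PySem.Int.band (Int.not number) (number - 1)))) ≠ 0 then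
    let count := powerof8Loop number 0
    if PySem.Int.mod count 2 = 0 then some true else some false
  else none

-- ===== PORT B =====
def powerof8_alt (number : Int) : Option Bool :=
  if number = 0 then none
  else if number ≤ 1 then some true
  else some (decide (PySem.Int.mod ((PySem.Int.bitLength number : Int) - 1) 2 = 0))

-- ===== PRECONDITION & SPEC =====
def Spec_powerof8 (number : Int) (out : Option Bool) : Prop := out = powerof8_alt number
instance (number : Int) (out : Option Bool) : Decidable (Spec_powerof8 number out) := by unfold Spec_powerof8; infer_instance

-- ===== CLAIM (what is proved, stated in full; the proofs are below) =====
def Claim_equal_powerof8 : Prop := ∀ (number : Int), Dom_powerof8 number → Spec_powerof8 number (powerof8 number)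

-- ===== LEMMAS AND PROOFS =====

theorem pvNot_eq (n : Int) : Int.not n = -n - 1 := by
  cases n with
  | ofNat m => simp [Int.not, Int.negSucc_eq]; omega
  | negSucc m => simp [Int.not, Int.negSucc_eq]

theorem pvShr1 (n : Int) : (n >>> (1 : Nat)) = n / 2 := by
  rw [Int.shiftRight_eq_div_pow]; norm_num

-- a &&& n + ldiff a n = a : the bits of a split into those shared with n and the rest
theorem pvLandAddLdiff (a : Nat) : ∀ n : Nat, (a &&& n) + Nat.ldiff a n = a := by
  induction a using Nat.binaryRec with
  | zero =>
    intro n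
    simp [Nat.ldiff, Nat.bitwise_zero_left]
  | bit ba a ih =>
    intro n
    induction n using Nat.bitCasesOn with
    | bit bn n' =>
      rw [Nat.land_bit, Nat.ldiff_bit]
      have h1 := ih n'
      simp only [Nat.bit_val]
      cases ba <;> cases bn <;> simp <;> omega

theorem pvSubLand (a n : Nat) : a - (a &&& n) = Nat.ldiff a n := by
  have h := pvLandAddLdiff a n
  omega

theorem pvIfDecide (p : Prop) [inst : Decidable p] :
    (if p then some true else some false) = some (decide p) := by
  split_ifs with h <;> simp [h]

theorem pvLandLdiff (n a : Nat) : n &&& Nat.ldiff a n = 0 := by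
  apply Nat.eq_of_testBit_eq
  intro i
  rw [Nat.testBit_land, Nat.testBit_ldiff]
  cases n.testBit i <;> simp

theorem pvLdiffLand (a n : Nat) : Nat.ldiff a n &&& a = Nat.ldiff a n := by
  apply Nat.eq_of_testBit_eq
  intro i
  rw [Nat.testBit_land, Nat.testBit_ldiff]
  cases a.testBit i <;> simp

-- A's guard reduces to the number itself
theorem pvGuard (n : Int) :
    PySem.Int.band n (Int.not (PySem.Int.band n (PySem.Int.band (Int.not n) (n - 1)))) = n := by
  rcases lt_trichotomy n 0 with hneg | hz | hpos
  · -- n < 0 : let M be the two's-complement magnitude of n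
    have hy : PySem.Int.band (Int.not n) (n - 1)
        = (((-n - 1).toNat - ((-n - 1).toNat &&& ((-n - 1).toNat + 1)) : Nat) : Int) := by
      rw [pvNot_eq, PySem.Int.band, if_pos (by omega), if_neg (by omega)]
      have h : (-(n - 1) - 1).toNat = (-n - 1).toNat + 1 := by omega
      rw [h]
    have h2 : PySem.Int.band n (PySem.Int.band (Int.not n) (n - 1)) = 0 := by
      rw [hy, PySem.Int.band, if_neg (by omega), if_pos (by positivity)]
      rw [Int.toNat_natCast]
      set M := (-n - 1).toNat with hM
      rw [pvSubLand M (M + 1), pvLdiffLand M (M + 1)]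
      simp
    rw [h2]
    have h4 : Int.not 0 = -1 := by decide
    rw [h4, PySem.Int.band_neg_one]
  · simp [hz, PySem.Int.band]
  · -- 0 < n
    have hy : PySem.Int.band (Int.not n) (n - 1)
        = (((n - 1).toNat - ((n - 1).toNat &&& n.toNat) : Nat) : Int) := by
      rw [pvNot_eq, PySem.Int.band, if_neg (by omega), if_pos (by omega)]
      have h : (-(-n - 1) - 1).toNat = n.toNat := by omega
      rw [h]
    have h2 : PySem.Int.band n (PySem.Int.band (Int.not n) (n - 1)) = 0 := by
      rw [hy, PySem.Int.band, if_pos (by omega), if_pos (by positivity)]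
      rw [Int.toNat_natCast, pvSubLand ((n - 1).toNat) n.toNat, pvLandLdiff]
      simp
    rw [h2]
    have h4 : Int.not 0 = -1 := by decide
    rw [h4, PySem.Int.band_neg_one]

-- the loop counts floor(log2 n) = bit_length(n) - 1 shifts for n > 1
theorem pvLoopEq (k : Nat) : ∀ (n : Int), n.toNat = k → 1 < n →
    ∀ c : Int, powerof8Loop n c = c + ((PySem.Int.bitLength n : Int) - 1) := by
  induction k using Nat.strong_induction_on with
  | _ k ih =>
    intro n hk hn c
    rw [powerof8Loop, if_pos hn, pvShr1]
    have hbl : PySem.Int.bitLength n = PySem.Int.bitLength (PySem.Int.floordiv n 2) + 1 :=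
      PySem.Int.bitLength_of_pos (by omega)
    have hfd : PySem.Int.floordiv n 2 = n / 2 :=
      PySem.Int.floordiv_eq_ediv_of_pos (by omega)
    by_cases h2 : 1 < n / 2
    · have hlt : (n / 2).toNat < k := by omega
      rw [ih _ hlt (n / 2) rfl h2 (c + 1), hbl, hfd]
      push_cast
      ring
    · -- here 2 ≤ n ≤ 3, so n / 2 = 1 and the next iteration stops
      have hdiv : n / 2 = 1 := by omega
      rw [powerof8Loop, if_neg (by omega)]
      have hb1 : PySem.Int.bitLength (PySem.Int.floordiv n 2) = 1 := by
        rw [hfd, hdiv]; decide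
      rw [hbl, hb1]
      push_cast
      ring

-- ===== VERDICT (by name: the statement is the Claim_ definition above) =====
theorem powerof8_spec : Claim_equal_powerof8 := by
  intro n _
  unfold Spec_powerof8 powerof8 powerof8_alt
  rw [pvGuard]
  by_cases h0 : n = 0
  · simp [h0]
  · rw [if_pos h0, if_neg h0]
    by_cases h1 : n ≤ 1
    · have hloop : powerof8Loop n 0 = 0 := by
        rw [powerof8Loop, if_neg (by omega)]
      simp only [hloop, if_pos h1]
      rw [if_pos (by decide)]
    · rw [if_neg h1]
      have hloop := pvLoopEq n.toNat n rfl (by omega) 0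
      simp only [hloop, zero_add]
      exact pvIfDecide _
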